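-- pv_equiv track=rewrite | github.com/nioliu/algorithm-python | tiktok/Prefix Scroes.py | getPrefixScores
-- ===== SOURCE A (Python) =====
-- base = pow(10, 9) + 7
--
-- def getPrefixScores(arr):
--     if len(arr) == 1:
--         return [arr[0] * 2]
--
--     # get the prefix most value
--     currMax = arr[0]
--     maxIndex = [currMax]  # first i index's max index
--     for i, v in enumerate(arr):
--         if i == 0:
--             continue
--         currMax = max(currMax, v)
--         maxIndex.append(currMax)
--
--     res = [2 * arr[0]]
--     lastMax = res[0]
--     for i in range(1, len(arr)):
--         currNums = arr[:i + 1]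
--         if maxIndex[i] > maxIndex[i - 1]:
--             currSum = 0
--             for j in range(i + 1):
--                 currNums[j] += currNums[j - 1]
--                 currSum += currNums[j]
--             res.append(currSum % base)
--             lastMax = currNums[i]
--         else:
--             lastMax = lastMax + arr[i]
--             res.append((res[i - 1] + lastMax) % base)
--     return res
-- ===== SOURCE B (Python) =====
-- base = pow(10, 9) + 7
--
-- def getPrefixScores(arr):
--     # O(n): maintain prefix sum s, sum-of-prefix-sums t, running max m.
--     m = arr[0]
--     s = arr[0]
--     t = arr[0]
--     res = [2 * arr[0]]
--     for i in range(1, len(arr)):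
--         v = arr[i]
--         s += v
--         t += s
--         if v > m:
--             m = v
--             res.append(((i + 1) * m + t) % base)
--         else:
--             res.append((res[-1] + m + s) % base)
--     return res
-- ===== Notes on version B (the rewrite author's own statement) =====
-- stated objective: faster
-- what changed: B replaces A's per-index O(n) recomputation of all prefix sums (the inner currNums loop, plus a separate pre-pass building the running-max list) with a single pass maintaining a running max, a running prefix sum and a running sum-of-prefix-sums, updating each result in O(1).
import Mathlib
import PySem

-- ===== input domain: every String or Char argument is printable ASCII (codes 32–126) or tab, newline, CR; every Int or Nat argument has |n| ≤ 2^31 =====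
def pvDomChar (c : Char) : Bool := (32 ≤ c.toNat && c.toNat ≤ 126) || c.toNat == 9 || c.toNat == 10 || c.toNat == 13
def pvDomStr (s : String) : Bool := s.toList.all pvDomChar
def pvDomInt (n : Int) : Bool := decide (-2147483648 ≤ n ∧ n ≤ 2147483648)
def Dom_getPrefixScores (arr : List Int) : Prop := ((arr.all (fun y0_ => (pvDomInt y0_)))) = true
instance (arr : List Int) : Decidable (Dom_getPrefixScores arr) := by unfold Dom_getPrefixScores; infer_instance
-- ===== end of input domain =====

-- B replaces A's quadratic per-index prefix recomputation by O(1) updates of a running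
-- prefix sum, sum-of-prefix-sums and running max (objective: faster, O(n^2) → O(n)).

def pvBase : Int := 10 ^ 9 + 7

-- ===== PORT A =====
def getPrefixScores (arr : List Int) : List Int :=
  if arr.length == 1 then
    [PySem.List.pyGetD arr 0 0 * 2]
  else
    -- currMax = arr[0]; maxIndex = [currMax]; for i, v in enumerate(arr): if i == 0: continue; …
    let currMax0 := PySem.List.pyGetD arr 0 0
    let st1 := (PySem.List.enumerate arr).foldl
      (fun (st : Int × List Int) iv =>
        if iv.1 == 0 then st
        else
          let cm := max st.1 iv.2
          (cm, st.2 ++ [cm]))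
      (currMax0, [currMax0])
    let maxIndex := st1.2
    -- res = [2*arr[0]]; lastMax = res[0]; for i in range(1, len(arr)): …
    let st2 := (PySem.List.pyRange 1 arr.length 1).foldl
      (fun (st : List Int × Int) i =>
        let res := st.1
        let lastMax := st.2
        let currNums := PySem.List.slice arr none (some (i + 1))
        if PySem.List.pyGetD maxIndex i 0 > PySem.List.pyGetD maxIndex (i - 1) 0 then
          -- currSum = 0; for j in range(i+1): currNums[j] += currNums[j-1]; currSum += currNums[j]
          let p := (PySem.List.pyRange 0 (i + 1) 1).foldl
            (fun (p : List Int × Int) j =>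
              let v := PySem.List.pyGetD p.1 j 0 + PySem.List.pyGetD p.1 (j - 1) 0
              (PySem.List.pySetD p.1 j v, p.2 + v))
            (currNums, 0)
          (res ++ [PySem.Int.mod p.2 pvBase], PySem.List.pyGetD p.1 i 0)
        else
          let lastMax' := lastMax + PySem.List.pyGetD arr i 0
          (res ++ [PySem.Int.mod (PySem.List.pyGetD res (i - 1) 0 + lastMax') pvBase], lastMax'))
      ([2 * currMax0], 2 * currMax0)
    st2.1

-- ===== PORT B =====
def getPrefixScores_alt (arr : List Int) : List Int :=
  let a0 := PySem.List.pyGetD arr 0 0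
  let st := (PySem.List.pyRange 1 arr.length 1).foldl
    (fun (st : Int × Int × Int × List Int) i =>
      let m := st.1
      let s := st.2.1
      let t := st.2.2.1
      let res := st.2.2.2
      let v := PySem.List.pyGetD arr i 0
      let s' := s + v
      let t' := t + s'
      if v > m then
        (v, s', t', res ++ [PySem.Int.mod ((i + 1) * v + t') pvBase])
      else
        (m, s', t', res ++ [PySem.Int.mod (PySem.List.pyGetD res (-1) 0 + m + s') pvBase]))
    (a0, a0, a0, [2 * a0])
  st.2.2.2

-- ===== PRECONDITION & SPEC =====
-- Pre_ excludes only the empty list, on which A raises IndexError at 'arr[0]' (B raises there too).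
def Pre_getPrefixScores (arr : List Int) : Prop := arr ≠ []
instance (arr : List Int) : Decidable (Pre_getPrefixScores arr) := by unfold Pre_getPrefixScores; infer_instance
def pvWitness_getPrefixScores : List Int := [3, 1, 4]

def Spec_getPrefixScores (arr : List Int) (out : List Int) : Prop := out = getPrefixScores_alt arr
instance (arr : List Int) (out : List Int) : Decidable (Spec_getPrefixScores arr out) := by unfold Spec_getPrefixScores; infer_instance

-- ===== CLAIM (what is proved, stated in full; the proofs are below) =====
def Claim_equal_getPrefixScores : Prop := ∀ (arr : List Int), Dom_getPrefixScores arr → Pre_getPrefixScores arr → Spec_getPrefixScores arr (getPrefixScores arr)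

-- ===== LEMMAS AND PROOFS =====

-- running max of a0 and the first k elements of rest
def pvM (a0 : Int) (rest : List Int) (k : Nat) : Int := (rest.take k).foldl max a0
-- prefix sum S(k) = a0 + rest[0] + ... + rest[k-1]
def pvS (a0 : Int) (rest : List Int) (k : Nat) : Int := a0 + (rest.take k).sum
-- T(k) = S(0) + ... + S(k)
def pvT (a0 : Int) (rest : List Int) : Nat → Int
  | 0 => a0
  | k + 1 => pvT a0 rest k + pvS a0 rest (k + 1)

-- A's first loop: enumerate-fold building the running-max list (indices ≥ 1 never hit the 'continue' branch)
theorem pv_enumFold (rest : List Int) (s cm : Int) (acc : List Int) (hs : 1 ≤ s) :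
    (PySem.List.enumerate rest s).foldl
      (fun (st : Int × List Int) iv =>
        if iv.1 == 0 then st else (max st.1 iv.2, st.2 ++ [max st.1 iv.2]))
      (cm, acc)
    = (rest.foldl max cm,
       acc ++ (List.range rest.length).map (fun k => (rest.take (k + 1)).foldl max cm)) := by
  induction rest generalizing s cm acc with
  | nil => simp [PySem.List.enumerate_nil]
  | cons x rs ih =>
    rw [PySem.List.enumerate_cons]
    simp only [List.foldl_cons]
    rw [if_neg (by simp; omega)]
    rw [ih (s + 1) (max cm x) (acc ++ [max cm x]) (by omega)]
    simp [List.range_succ_eq_map, List.append_assoc, Function.comp]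

-- maxIndex for arr = a0 :: rest is the list of running maxes pvM
theorem pv_maxIndex (a0 : Int) (rest : List Int) :
    ((PySem.List.enumerate (a0 :: rest)).foldl
      (fun (st : Int × List Int) iv =>
        if iv.1 == 0 then st else (max st.1 iv.2, st.2 ++ [max st.1 iv.2]))
      (a0, [a0])).2
    = (List.range (rest.length + 1)).map (pvM a0 rest) := by
  rw [PySem.List.enumerate_cons]
  simp only [List.foldl_cons, beq_self_eq_true, if_true, zero_add]
  rw [pv_enumFold rest 1 a0 [a0] le_rfl]
  simp [List.range_succ_eq_map, pvM, Function.comp]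

-- A's inner loop over currNums: each cell becomes getLast+prefix-sum (cell 0 reads currNums[-1])
theorem pv_inner (L : List Int) (hL : L ≠ []) (m : Nat) (hm : m ≤ L.length) :
    (List.range m).foldl
      (fun (p : List Int × Int) (j : Nat) =>
        (PySem.List.pySetD p.1 (j : Int)
            (PySem.List.pyGetD p.1 (j : Int) 0 + PySem.List.pyGetD p.1 ((j : Int) - 1) 0),
          p.2 + (PySem.List.pyGetD p.1 (j : Int) 0 + PySem.List.pyGetD p.1 ((j : Int) - 1) 0)))
      (L, 0)
    = ((List.range m).map (fun j => L.getLast hL + (L.take (j + 1)).sum) ++ L.drop m,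
       ((List.range m).map (fun j => L.getLast hL + (L.take (j + 1)).sum)).sum) := by
  induction m with
  | zero => simp
  | succ m ih =>
    have hm' : m < L.length := by omega
    rw [List.range_succ, List.foldl_append, ih (by omega)]
    have hdrop : L.drop m = L[m] :: L.drop (m + 1) := List.drop_eq_getElem_cons hm'
    have hlenmap : ((List.range m).map (fun j => L.getLast hL + (L.take (j + 1)).sum)).length = m := by
      simp
    have hread1 : PySem.List.pyGetD
        ((List.range m).map (fun j => L.getLast hL + (L.take (j + 1)).sum) ++ L.drop m) (m : Int) 0
        = L[m] := by
      rw [PySem.List.pyGetD_natCast]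
      rw [List.getD_eq_getElem?_getD, List.getElem?_append_right (by omega), hlenmap]
      simp [List.getElem?_drop, List.getElem?_eq_getElem hm']
    have hread2 : PySem.List.pyGetD
        ((List.range m).map (fun j => L.getLast hL + (L.take (j + 1)).sum) ++ L.drop m) ((m : Int) - 1) 0
        = L.getLast hL + (L.take m).sum := by
      cases m with
      | zero =>
        simp only [List.range_zero, List.map_nil, List.nil_append, List.drop_zero,
          Nat.cast_zero, zero_sub]
        rw [PySem.List.pyGetD_neg_one L 0 hL]
        simp
      | succ j =>
        have : ((j + 1 : Nat) : Int) - 1 = (j : Int) := by push_cast; ring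
        rw [this, PySem.List.pyGetD_natCast]
        rw [List.getD_eq_getElem?_getD, List.getElem?_append_left (by simp)]
        simp
    have hval : (L.take (m + 1)).sum = (L.take m).sum + L[m] := List.sum_take_succ L m hm'
    simp only [List.foldl_cons, List.foldl_nil]
    rw [hread1, hread2]
    rw [PySem.List.pySetD_natCast]
    rw [hdrop]
    rw [List.set_append_right _ _ (by omega)]
    rw [hlenmap]
    simp only [Nat.sub_self, List.set_cons_zero]
    simp only [List.map_append, List.map_cons, List.map_nil, List.sum_append, List.sum_cons,
      List.sum_nil]
    rw [Prod.mk.injEq]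
    constructor
    · rw [List.append_assoc, List.singleton_append, hval]
      norm_num
      ring_nf
    · rw [hval]; ring

theorem pvM_succ (a0 : Int) (rest : List Int) (k : Nat) (hk : k < rest.length) :
    pvM a0 rest (k + 1) = max (pvM a0 rest k) rest[k] := by
  unfold pvM
  rw [List.take_add_one, List.getElem?_eq_getElem hk]
  simp only [Option.toList_some, List.foldl_append, List.foldl_cons, List.foldl_nil]

theorem pvS_succ (a0 : Int) (rest : List Int) (k : Nat) (hk : k < rest.length) :
    pvS a0 rest (k + 1) = pvS a0 rest k + rest[k] := by
  unfold pvS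
  rw [List.sum_take_succ rest k hk]
  ring

theorem pvT_eq_sum (a0 : Int) (rest : List Int) (k : Nat) :
    pvT a0 rest k = ((List.range (k + 1)).map (pvS a0 rest)).sum := by
  induction k with
  | zero => simp [pvT, pvS]
  | succ k ih => rw [List.range_succ]; simp [pvT, ih]

theorem pv_sum_shift (c : Int) (f : Nat → Int) (n : Nat) :
    ((List.range n).map (fun j => c + f j)).sum = n * c + ((List.range n).map f).sum := by
  induction n with
  | zero => simp
  | succ n ih => rw [List.range_succ]; simp [ih]; ring

-- the coupled main-loop invariant: after indices 1..k both folds hold the same res,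
-- A's lastMax = M(k)+S(k), B's state = (M(k), S(k), T(k), res)
theorem pv_main (a0 : Int) (rest : List Int) (k : Nat) (hk : k ≤ rest.length) :
    ∃ res : List Int, res.length = k + 1 ∧
    (List.foldl
      (fun (st : List Int × Int) (i : Int) =>
        if PySem.List.pyGetD ((List.range (rest.length + 1)).map (pvM a0 rest)) i 0 >
             PySem.List.pyGetD ((List.range (rest.length + 1)).map (pvM a0 rest)) (i - 1) 0 then
          (st.1 ++ [PySem.Int.mod (List.foldl (fun (p : List Int × Int) (j : Int) =>
                (PySem.List.pySetD p.1 j (PySem.List.pyGetD p.1 j 0 + PySem.List.pyGetD p.1 (j - 1) 0),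
                  p.2 + (PySem.List.pyGetD p.1 j 0 + PySem.List.pyGetD p.1 (j - 1) 0)))
                (PySem.List.slice (a0 :: rest) none (some (i + 1)), 0) (PySem.List.pyRange 0 (i + 1))).2 pvBase],
            PySem.List.pyGetD (List.foldl (fun (p : List Int × Int) (j : Int) =>
                (PySem.List.pySetD p.1 j (PySem.List.pyGetD p.1 j 0 + PySem.List.pyGetD p.1 (j - 1) 0),
                  p.2 + (PySem.List.pyGetD p.1 j 0 + PySem.List.pyGetD p.1 (j - 1) 0)))
                (PySem.List.slice (a0 :: rest) none (some (i + 1)), 0) (PySem.List.pyRange 0 (i + 1))).1 i 0)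
        else
          (st.1 ++ [PySem.Int.mod (PySem.List.pyGetD st.1 (i - 1) 0 + (st.2 + PySem.List.pyGetD (a0 :: rest) i 0)) pvBase],
            st.2 + PySem.List.pyGetD (a0 :: rest) i 0))
      ([2 * a0], 2 * a0) (PySem.List.pyRange 1 (1 + (k : Int)))
      = (res, pvM a0 rest k + pvS a0 rest k)) ∧
    (List.foldl
      (fun (st : Int × Int × Int × List Int) (i : Int) =>
        if PySem.List.pyGetD (a0 :: rest) i 0 > st.1 then
          (PySem.List.pyGetD (a0 :: rest) i 0, st.2.1 + PySem.List.pyGetD (a0 :: rest) i 0,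
            st.2.2.1 + (st.2.1 + PySem.List.pyGetD (a0 :: rest) i 0),
            st.2.2.2 ++ [PySem.Int.mod ((i + 1) * PySem.List.pyGetD (a0 :: rest) i 0 + (st.2.2.1 + (st.2.1 + PySem.List.pyGetD (a0 :: rest) i 0))) pvBase])
        else
          (st.1, st.2.1 + PySem.List.pyGetD (a0 :: rest) i 0,
            st.2.2.1 + (st.2.1 + PySem.List.pyGetD (a0 :: rest) i 0),
            st.2.2.2 ++ [PySem.Int.mod (PySem.List.pyGetD st.2.2.2 (-1) 0 + st.1 + (st.2.1 + PySem.List.pyGetD (a0 :: rest) i 0)) pvBase]))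
      (a0, a0, a0, [2 * a0]) (PySem.List.pyRange 1 (1 + (k : Int)))
      = (pvM a0 rest k, pvS a0 rest k, pvT a0 rest k, res)) := by
  induction k with
  | zero =>
    refine ⟨[2 * a0], rfl, ?_, ?_⟩ <;>
      rw [PySem.List.pyRange_one_eq_nil (by omega)] <;>
      simp [pvM, pvS, pvT, two_mul]
  | succ k ih =>
    obtain ⟨res, hlen, hA, hB⟩ := ih (by omega)
    have hk' : k < rest.length := by omega
    have hrange : PySem.List.pyRange 1 (1 + ((k + 1 : Nat) : Int))
        = PySem.List.pyRange 1 (1 + (k : Int)) ++ [1 + (k : Int)] := by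
      have h1 : 1 + ((k + 1 : Nat) : Int) = (1 + (k : Int)) + 1 := by push_cast; ring
      rw [h1, PySem.List.pyRange_one_succ_right (by omega)]
    -- the element arr[i] at i = 1+k
    have hget : PySem.List.pyGetD (a0 :: rest) (1 + (k : Int)) 0 = rest[k] := by
      have h1 : (1 + (k : Int)) = ((k + 1 : Nat) : Int) := by push_cast; ring
      rw [h1, PySem.List.pyGetD_natCast]
      simp [List.getD_eq_getElem?_getD, List.getElem?_eq_getElem hk']
    -- the two maxIndex reads
    have hmx1 : PySem.List.pyGetD ((List.range (rest.length + 1)).map (pvM a0 rest)) (1 + (k : Int)) 0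
        = pvM a0 rest (k + 1) := by
      have h1 : (1 + (k : Int)) = ((k + 1 : Nat) : Int) := by push_cast; ring
      rw [h1, PySem.List.pyGetD_natCast, PySem.List.getD_map_range _ _ _ _ (by omega)]
    have hmx0 : PySem.List.pyGetD ((List.range (rest.length + 1)).map (pvM a0 rest)) (1 + (k : Int) - 1) 0
        = pvM a0 rest k := by
      have h1 : (1 + (k : Int) - 1) = ((k : Nat) : Int) := by ring
      rw [h1, PySem.List.pyGetD_natCast, PySem.List.getD_map_range _ _ _ _ (by omega)]
    have hMsucc := pvM_succ a0 rest k hk'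
    have hSsucc := pvS_succ a0 rest k hk'
    -- last element of res: A reads res[i-1], B reads res[-1]
    have hresne : res ≠ [] := by intro h; rw [h] at hlen; simp at hlen
    have hlast : PySem.List.pyGetD res (1 + (k : Int) - 1) 0 = PySem.List.pyGetD res (-1) 0 := by
      have h1 : (1 + (k : Int) - 1) = ((k : Nat) : Int) := by ring
      rw [h1, PySem.List.pyGetD_natCast, PySem.List.pyGetD_neg_one res 0 hresne]
      rw [List.getLast_eq_getElem]
      simp [List.getD_eq_getElem?_getD, hlen]
    rw [hrange, List.foldl_append, List.foldl_append, hA, hB]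
    simp only [List.foldl_cons, List.foldl_nil, hmx1, hmx0, hget]
    by_cases hbr : rest[k] > pvM a0 rest k
    · -- new running max: A recomputes the whole prefix, B uses the closed form
      have hcond : pvM a0 rest (k + 1) > pvM a0 rest k := by
        rw [hMsucc]; exact lt_max_of_lt_right hbr
      rw [if_pos hcond, if_pos hbr]
      -- A's inner loop on L = arr[:k+2]
      have hslice : PySem.List.slice (a0 :: rest) none (some (1 + (k : Int) + 1))
          = a0 :: rest.take (k + 1) := by
        have h1 : (1 + (k : Int) + 1) = ((k + 2 : Nat) : Int) := by push_cast; ring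
        rw [h1, PySem.List.slice_to_natCast]
        simp
      have hLne : (a0 :: rest.take (k + 1) : List Int) ≠ [] := by simp
      have hLlen : (a0 :: rest.take (k + 1) : List Int).length = k + 2 := by simp; omega
      have hinner := pv_inner (a0 :: rest.take (k + 1)) hLne (k + 2) (by omega)
      have h2 : (1 + (k : Int) + 1) = ((k + 2 : Nat) : Int) := by push_cast; ring
      rw [hslice, h2, PySem.List.pyRange_zero_natCast, List.foldl_map]
      rw [hinner]
      -- getLast of L is rest[k]
      have hlast' : (a0 :: rest.take (k + 1)).getLast hLne = rest[k] := by
        have htne : rest.take (k + 1) ≠ [] := by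
          intro h
          have h2 := congrArg List.length h
          simp only [List.length_take, List.length_nil] at h2
          omega
        rw [List.getLast_cons htne, List.getLast_eq_getElem]
        have hlen' : (rest.take (k + 1)).length = k + 1 := by simp; omega
        simp only [hlen', Nat.add_sub_cancel]
        simp [List.getElem_take]
      -- prefixes of L are the pvS values
      have htake : ∀ j : Nat, j ≤ k + 1 → ((a0 :: rest.take (k + 1)).take (j + 1)).sum = pvS a0 rest j := by
        intro j hj
        simp only [List.take_succ_cons, List.take_take, Nat.min_eq_left hj]
        simp [pvS]
      have hmap : (List.range (k + 2)).map
            (fun j => (a0 :: rest.take (k + 1)).getLast hLne + ((a0 :: rest.take (k + 1)).take (j + 1)).sum)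
          = (List.range (k + 2)).map (fun j => rest[k] + pvS a0 rest j) := by
        apply List.map_congr_left
        intro j hj
        rw [hlast', htake j (by simpa using Nat.lt_succ_iff.mp (by simpa [Nat.lt_succ_iff] using List.mem_range.mp hj))]
      have hsum : ((List.range (k + 2)).map (fun j => rest[k] + pvS a0 rest j)).sum
          = (k + 2 : Nat) * rest[k] + pvT a0 rest (k + 1) := by
        rw [pv_sum_shift, pvT_eq_sum]
      have hdropL : (a0 :: rest.take (k + 1)).drop (k + 2) = [] := by
        apply List.drop_eq_nil_of_le
        omega
      have hreadLast : PySem.List.pyGetD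
          ((List.range (k + 2)).map
              (fun j => (a0 :: rest.take (k + 1)).getLast hLne + ((a0 :: rest.take (k + 1)).take (j + 1)).sum)
            ++ (a0 :: rest.take (k + 1)).drop (k + 2))
          (1 + (k : Int)) 0 = rest[k] + pvS a0 rest (k + 1) := by
        rw [hdropL, List.append_nil, hmap]
        have h1 : (1 + (k : Int)) = ((k + 1 : Nat) : Int) := by push_cast; ring
        rw [h1, PySem.List.pyGetD_natCast, PySem.List.getD_map_range _ _ _ _ (by omega)]
      refine ⟨res ++ [PySem.Int.mod (((k + 2 : Nat) : Int) * rest[k] + (pvT a0 rest k + (pvS a0 rest k + rest[k]))) pvBase],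
        by simp [hlen], ?_, ?_⟩
      · rw [Prod.mk.injEq]
        constructor
        · rw [hmap, hsum, pvT, hSsucc]
        · rw [hreadLast, hMsucc, max_eq_right (le_of_lt hbr), hSsucc]
      · rw [Prod.mk.injEq, Prod.mk.injEq, Prod.mk.injEq]
        refine ⟨?_, ?_, ?_, rfl⟩
        · rw [hMsucc, max_eq_right (le_of_lt hbr)]
        · rw [hSsucc]
        · show pvT a0 rest k + (pvS a0 rest k + rest[k]) = pvT a0 rest (k + 1)
          rw [pvT, hSsucc]
    · have hcond : ¬ pvM a0 rest (k + 1) > pvM a0 rest k := by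
        rw [hMsucc]; simp [max_eq_left (not_lt.mp hbr)]
      rw [if_neg hcond, if_neg hbr]
      refine ⟨res ++ [PySem.Int.mod (PySem.List.pyGetD res (-1) 0 + pvM a0 rest k + (pvS a0 rest k + rest[k])) pvBase], by simp [hlen], ?_, ?_⟩
      · rw [Prod.mk.injEq]
        constructor
        · rw [hlast]
          congr 2
          ring
        · rw [hMsucc, max_eq_left (not_lt.mp hbr), hSsucc]; ring
      · rw [Prod.mk.injEq, Prod.mk.injEq, Prod.mk.injEq]
        refine ⟨?_, ?_, ?_, rfl⟩
        · rw [hMsucc, max_eq_left (not_lt.mp hbr)]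
        · rw [hSsucc]
        · show pvT a0 rest k + (pvS a0 rest k + rest[k]) = pvT a0 rest (k + 1)
          rw [pvT, hSsucc]

-- ===== VERDICT (by name: the statement is the Claim_ definition above) =====
theorem getPrefixScores_spec : Claim_equal_getPrefixScores := by
  intro arr _ hpre
  unfold Spec_getPrefixScores
  match arr with
  | [] => exact absurd rfl hpre
  | [x] =>
    simp [getPrefixScores, getPrefixScores_alt, PySem.List.pyRange_one_eq_nil, mul_comm]
  | a0 :: b :: rs =>
    obtain ⟨res, hlen, hA, hB⟩ := pv_main a0 (b :: rs) (b :: rs).length le_rfl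
    have hlc : (((a0 :: b :: rs).length : Nat) : Int) = 1 + (((b :: rs).length : Nat) : Int) := by
      push_cast [List.length_cons]
      ring
    simp only [getPrefixScores, getPrefixScores_alt]
    rw [if_neg (by simp)]
    simp only [PySem.List.pyGetD_zero_cons]
    rw [pv_maxIndex a0 (b :: rs), hlc, hA, hB]
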